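-- pv_equiv track=rewrite | github.com/remowxdx/AoC-2023 | aoc12.py | to_check
-- ===== SOURCE A (Python) =====
-- def to_check(record):
--     run = []
--     count = 0
--     for char in record:
--         if char == "?":
--             if count > 0:
--                 run.append(count)
--             return run
--         if char == "#":
--             count += 1
--         else:
--             if count > 0:
--                 run.append(count)
--                 count = 0
--     if count > 0:
--         run.append(count)
--     return run
-- ===== SOURCE B (Python) =====
-- def to_check(record):
--     prefix = record.split("?", 1)[0]
--     return [len(run) for run in "".join(c if c == "#" else " " for c in prefix).split()]
-- ===== Notes on version B (the rewrite author's own statement) =====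
-- stated objective: simpler
-- what changed: Replaces A's single pass with a running counter and early-return by a two-phase pipeline: slice off everything before the first '?', then split that prefix into maximal '#' runs and take their lengths.
import Mathlib
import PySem

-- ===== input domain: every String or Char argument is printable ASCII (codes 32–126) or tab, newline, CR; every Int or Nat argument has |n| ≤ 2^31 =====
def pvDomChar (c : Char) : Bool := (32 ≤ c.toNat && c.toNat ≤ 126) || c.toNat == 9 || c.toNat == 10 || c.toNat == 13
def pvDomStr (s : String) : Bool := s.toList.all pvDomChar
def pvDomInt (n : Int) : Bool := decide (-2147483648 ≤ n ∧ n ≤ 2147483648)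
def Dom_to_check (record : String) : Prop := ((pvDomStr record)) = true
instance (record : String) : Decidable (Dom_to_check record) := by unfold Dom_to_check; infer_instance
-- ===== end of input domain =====

-- B replaces A's single pass with a running counter and early return by a two-phase
-- pipeline: cut the string at the first '?', then split the prefix into maximal '#'
-- runs and take their lengths (objective: simpler decomposition).

-- ===== PORT A =====
-- A's for-loop over the characters with the early `return run` on '?' becomes
-- structural recursion on the character list carrying the same state (run, count).
def pvGoA : List Char → List Int → Int → List Int
  | [], run, count => if count > 0 then run ++ [count] else run
  | c :: cs, run, count =>
    if c = '?' then (if count > 0 then run ++ [count] else run)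
    else if c = '#' then pvGoA cs run (count + 1)
    else pvGoA cs (if count > 0 then run ++ [count] else run) 0

def to_check (record : String) : List Int := pvGoA record.toList [] 0

-- ===== PORT B =====
-- Source B: record.split("?", 1)[0] = the characters before the first '?' (takeWhile).
-- The mapped prefix contains only '#' and ' ', so Python's whitespace .split()
-- splits exactly at ' '; pvWordLens is that split, returning run lengths directly.
def pvWordLens : List Char → List Int
  | [] => []
  | c :: cs =>
    if c = ' ' then pvWordLens cs
    else (((cs.takeWhile (fun d => d ≠ ' ')).length : Int) + 1) ::
      pvWordLens (cs.dropWhile (fun d => d ≠ ' '))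
termination_by l => l.length
decreasing_by
  all_goals simp only [List.length_cons]
  all_goals try omega
  all_goals (have := List.length_dropWhile_le (fun d => decide (d ≠ ' ')) cs; omega)

def to_check_alt (record : String) : List Int :=
  pvWordLens (((record.toList.takeWhile (fun c => c ≠ '?')).map
    (fun c => if c = '#' then '#' else ' ')))

-- ===== PRECONDITION & SPEC =====
def Spec_to_check (record : String) (out : List Int) : Prop := out = to_check_alt record
instance (record : String) (out : List Int) : Decidable (Spec_to_check record out) := by unfold Spec_to_check; infer_instance

-- ===== CLAIM (what is proved, stated in full; the proofs are below) =====
def Claim_equal_to_check : Prop := ∀ (record : String), Dom_to_check record → Spec_to_check record (to_check record)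

-- ===== LEMMAS AND PROOFS =====

-- Reference run-length function both ports are reduced to.
def pvRuns : Int → List Char → List Int
  | count, [] => if count > 0 then [count] else []
  | count, c :: cs =>
    if c = '#' then pvRuns (count + 1) cs
    else if count > 0 then count :: pvRuns 0 cs else pvRuns 0 cs

lemma pvGoA_eq (cs : List Char) : ∀ (run : List Int) (count : Int),
    pvGoA cs run count = run ++ pvRuns count (cs.takeWhile (fun c => c ≠ '?')) := by
  induction cs with
  | nil => intro run count; simp [pvGoA, pvRuns]; split <;> simp
  | cons c cs ih =>
    intro run count
    by_cases hq : c = '?'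
    · subst hq; simp [pvGoA, pvRuns]; split <;> simp
    · by_cases hh : c = '#'
      · subst hh
        simp [pvGoA, pvRuns, ih]
      · simp [pvGoA, pvRuns, hq, hh, ih]
        split <;> simp

lemma pvRuns_pos (cs : List Char) : ∀ (count : Int), 0 < count →
    pvRuns count cs =
      (count + ((cs.takeWhile (fun c => c = '#')).length : Int)) ::
        pvRuns 0 (cs.dropWhile (fun c => c = '#')) := by
  induction cs with
  | nil => intro count h; simp [pvRuns, h]
  | cons c cs ih =>
    intro count h
    by_cases hh : c = '#'
    · subst hh
      rw [pvRuns]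
      simp only [List.takeWhile_cons, List.dropWhile_cons]
      rw [ih (count + 1) (by omega)]
      simp
      ring_nf
    · rw [pvRuns]
      simp only [if_neg hh, if_pos h, List.takeWhile_cons, List.dropWhile_cons]
      simp [hh]
      conv_rhs => rw [pvRuns]
      simp [hh]

lemma pvWordLens_eq_pvRuns (n : Nat) : ∀ (l : List Char), l.length ≤ n →
    pvWordLens (l.map (fun c => if c = '#' then '#' else ' ')) = pvRuns 0 l := by
  induction n with
  | zero => intro l h; simp at h; simp [h, pvWordLens, pvRuns]
  | succ n ih =>
    intro l h
    match l with
    | [] => simp [pvWordLens, pvRuns]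
    | c :: cs =>
      by_cases hh : c = '#'
      · subst hh
        rw [List.map_cons, pvWordLens]
        rw [List.takeWhile_map, List.dropWhile_map]
        have hfun : ((fun d => decide (d ≠ ' ')) ∘ fun c => if c = '#' then '#' else ' ')
            = fun c => decide (c = '#') := by
          funext x; by_cases hx : x = '#' <;> simp [hx]
        rw [hfun]
        rw [pvRuns]
        norm_num
        rw [pvRuns_pos cs 1 (by omega)]
        have hlen : (cs.dropWhile (fun c => decide (c = '#'))).length ≤ n := by
          have := List.length_dropWhile_le (fun c => decide (c = '#')) cs
          simp at h; omega
        rw [ih _ hlen]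
        simp
        ring
      · rw [List.map_cons]
        simp only [if_neg hh]
        rw [pvWordLens]
        rw [pvRuns]
        simp only [if_neg hh]
        simp
        exact ih cs (by simp at h; omega)

-- ===== VERDICT (by name: the statement is the Claim_ definition above) =====
theorem to_check_spec : Claim_equal_to_check := by
  intro record _
  unfold Spec_to_check to_check to_check_alt
  rw [pvGoA_eq, pvWordLens_eq_pvRuns (record.toList.takeWhile (fun c => c ≠ '?')).length _ le_rfl]
  simp
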